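-- pv_equiv track=rewrite | github.com/th-nuernberg/crisis-facts-summaries | website/Data/glpk_test.py | calculateOccurrences
-- ===== SOURCE A (Python) =====
-- def calculateOccurrences(bigramList, sentenceBigramList):
--     dimColumns = len(bigramList)
--     dimRows = len(sentenceBigramList)
--     occ = [[0 for j in range(dimColumns)] for i in range(dimRows)]
--     for i in range(len(sentenceBigramList)):
--         for j in range(len(bigramList)):
--             if bigramList[j] in sentenceBigramList[i]:
--                 occ[i][j] = 1
--     return occ
-- ===== SOURCE B (Python) =====
-- def calculateOccurrences(bigramList, sentenceBigramList):
--     # Inverted index: bigram value -> list of all its column indices.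
--     index = {}
--     for col, b in enumerate(bigramList):
--         index.setdefault(b, []).append(col)
--     occ = []
--     for sentence in sentenceBigramList:
--         row = [0] * len(bigramList)
--         for e in sentence:
--             for col in index.get(e, []):
--                 row[col] = 1
--         occ.append(row)
--     return occ
-- ===== Notes on version B (the rewrite author's own statement) =====
-- stated objective: faster
-- what changed: Replaces the nested scan (for every cell, a linear membership scan of the sentence) by an inverted index from bigram value to its column positions built once, so each sentence row is filled by looking up each sentence element's columns directly.
import Mathlib
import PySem

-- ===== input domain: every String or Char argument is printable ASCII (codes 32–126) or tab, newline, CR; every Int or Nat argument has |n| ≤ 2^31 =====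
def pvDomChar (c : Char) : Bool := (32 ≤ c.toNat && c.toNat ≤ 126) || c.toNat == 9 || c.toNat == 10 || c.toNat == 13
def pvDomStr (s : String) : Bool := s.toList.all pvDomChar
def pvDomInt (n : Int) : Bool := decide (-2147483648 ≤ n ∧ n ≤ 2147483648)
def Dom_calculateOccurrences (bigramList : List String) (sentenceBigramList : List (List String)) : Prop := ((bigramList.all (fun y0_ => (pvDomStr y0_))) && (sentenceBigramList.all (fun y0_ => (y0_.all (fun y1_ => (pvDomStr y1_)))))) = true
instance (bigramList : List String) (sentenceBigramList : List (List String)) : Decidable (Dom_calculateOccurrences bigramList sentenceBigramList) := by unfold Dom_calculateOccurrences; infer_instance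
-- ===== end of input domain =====

-- B replaces A's per-cell membership scan by an inverted index (bigram -> its column indices) built once; objective: faster.

-- ===== PORT A =====
-- Literal port of A. range(len(..)) indices are always in bounds, so reads
-- bigramList[j] / sentenceBigramList[i] are ported with getD and the
-- assignment occ[i][j] = 1 with List.set at exact Nat indices.
def calculateOccurrences (bigramList : List String) (sentenceBigramList : List (List String)) : List (List Int) :=
  let dimColumns := bigramList.length
  let dimRows := sentenceBigramList.length
  let occ := (List.range dimRows).map (fun _ => (List.range dimColumns).map (fun _ => (0:Int)))
  (List.range sentenceBigramList.length).foldl (fun occ i =>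
    (List.range bigramList.length).foldl (fun occ j =>
      if (bigramList.getD j "") ∈ (sentenceBigramList.getD i []) then
        occ.set i ((occ.getD i []).set j 1)
      else occ) occ) occ

-- ===== PORT B =====
-- index.setdefault(b, []).append(col)  ==  d.modify b [] (· ++ [col])
def pvBuildIndex (bl : List String) : PySem.Dict String (List Int) :=
  (PySem.List.enumerate bl).foldl (fun d p => d.modify p.2 [] (· ++ [p.1])) PySem.Dict.empty

-- row = [0]*len(bigramList); for e in sentence: for col in index.get(e, []): row[col] = 1
def pvMakeRow (idx : PySem.Dict String (List Int)) (n : Nat) (s : List String) : List Int :=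
  s.foldl (fun r e => (idx.getD e []).foldl (fun r c => PySem.List.pySetD r c 1) r)
    (List.replicate n 0)

def calculateOccurrences_alt (bigramList : List String) (sentenceBigramList : List (List String)) : List (List Int) :=
  sentenceBigramList.map (pvMakeRow (pvBuildIndex bigramList) bigramList.length)

-- ===== PRECONDITION & SPEC =====
def Spec_calculateOccurrences (bigramList : List String) (sentenceBigramList : List (List String)) (out : List (List Int)) : Prop := out = calculateOccurrences_alt bigramList sentenceBigramList
instance (bigramList : List String) (sentenceBigramList : List (List String)) (out : List (List Int)) : Decidable (Spec_calculateOccurrences bigramList sentenceBigramList out) := by unfold Spec_calculateOccurrences; infer_instance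

-- ===== CLAIM (what is proved, stated in full; the proofs are below) =====
def Claim_equal_calculateOccurrences : Prop := ∀ (bigramList : List String) (sentenceBigramList : List (List String)), Dom_calculateOccurrences bigramList sentenceBigramList → Spec_calculateOccurrences bigramList sentenceBigramList (calculateOccurrences bigramList sentenceBigramList)

-- ===== LEMMAS AND PROOFS =====

-- Both ports are shown equal to the same matrix:
-- sbl.map (fun s => bl.map (fun b => if b ∈ s then 1 else 0)).

theorem pvGetElem?_set {α : Type} (l : List α) (i j : Nat) (a : α) :
    (l.set i a)[j]? = if i = j ∧ i < l.length then some a else l[j]? := by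
  by_cases h : i = j
  · subst h; simp; split <;> simp_all
  · simp [List.getElem?_set_ne h, h]

theorem pvSet1 {α : Type} (l : List α) (i j : Nat) (a : α) :
    ((l.set i a).set j a)[j]? = (l.set j a)[j]? := by
  have h1 : ∀ (m : List α), m.length = l.length →
      (m.set j a)[j]? = if j < l.length then some a else none := by
    intro m hm
    by_cases hj : j < l.length
    · rw [if_pos hj]
      have : (m.set j a)[j]? = some a := by
        rw [pvGetElem?_set, if_pos ⟨rfl, by omega⟩]
      exact this
    · rw [if_neg hj, List.getElem?_eq_none (by simp [hm]; omega)]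
  rw [h1 _ (by simp), h1 _ rfl]

theorem pvSetFold_len (P : List Int) (r : List Int) :
    (P.foldl (fun r c => PySem.List.pySetD r c 1) r).length = r.length := by
  induction P generalizing r with
  | nil => rfl
  | cons a P ih => simp [List.foldl_cons, ih, PySem.List.length_pySetD]

theorem pvSetFold_getElem? (P : List Int) (hP : ∀ c ∈ P, 0 ≤ c) (r : List Int) (j : Nat) :
    (P.foldl (fun r c => PySem.List.pySetD r c 1) r)[j]? =
      if (j : Int) ∈ P then (r.set j 1)[j]? else r[j]? := by
  induction P generalizing r with
  | nil => simp
  | cons a P ih =>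
    have ha : (0:Int) ≤ a := hP a (by simp)
    have hstep : PySem.List.pySetD r a 1 = r.set a.toNat 1 := PySem.List.pySetD_of_nonneg r 1 ha
    rw [List.foldl_cons, ih (fun c hc => hP c (by simp [hc])), hstep]
    by_cases hm : (j : Int) ∈ P
    · rw [if_pos hm, if_pos (List.mem_cons_of_mem _ hm), pvSet1]
    · by_cases he : (j : Int) = a
      · have hat : a.toNat = j := by omega
        rw [if_neg hm, if_pos (by simp [he]), hat]
      · have hja : a.toNat ≠ j := by omega
        rw [if_neg hm, if_neg (by simp [hm, he]), List.getElem?_set_ne hja]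

theorem pvRowFold_getElem? (s : List String) (cols : String → List Int)
    (hc : ∀ e c, c ∈ cols e → 0 ≤ c) (r : List Int) (j : Nat) :
    (s.foldl (fun r e => (cols e).foldl (fun r c => PySem.List.pySetD r c 1) r) r)[j]? =
      if ∃ e ∈ s, (j : Int) ∈ cols e then (r.set j 1)[j]? else r[j]? := by
  induction s generalizing r with
  | nil => simp
  | cons e s ih =>
    rw [List.foldl_cons, ih]
    have hlen : ((cols e).foldl (fun r c => PySem.List.pySetD r c 1) r).length = r.length :=
      pvSetFold_len _ _
    by_cases hs : ∃ e' ∈ s, (j : Int) ∈ cols e'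
    · obtain ⟨e', he', hje'⟩ := hs
      rw [if_pos ⟨e', he', hje'⟩, if_pos ⟨e', List.mem_cons_of_mem _ he', hje'⟩]
      rw [pvGetElem?_set, pvGetElem?_set]
      simp only [hlen]
      split
      · rfl
      · rw [pvSetFold_getElem? _ (hc e) r j]
        split <;> [skip; rfl]
        rw [pvGetElem?_set]
        simp_all
    · rw [if_neg hs, pvSetFold_getElem? _ (hc e) r j]
      by_cases hm : (j : Int) ∈ cols e
      · rw [if_pos hm, if_pos ⟨e, by simp, hm⟩]
      · rw [if_neg hm, if_neg (by rintro ⟨x, hx, hmx⟩; rcases List.mem_cons.1 hx with h|h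
                                  · exact hm (h ▸ hmx)
                                  · exact hs ⟨x, h, hmx⟩)]

theorem pvIndex_getD (bl : List String) (e : String) :
    (pvBuildIndex bl).getD e [] =
      (((PySem.List.enumerate bl).map (fun p => (p.2, p.1))).filter (fun p => p.1 == e)).map (·.2) := by
  have h : pvBuildIndex bl = (((PySem.List.enumerate bl).map (fun p => (p.2, p.1))).foldl
      (fun d p => d.modify p.1 [] (· ++ [p.2])) PySem.Dict.empty) := by
    unfold pvBuildIndex
    rw [List.foldl_map]
  rw [h, PySem.Dict.getD_foldl_modify_append]
  simp

theorem pvMem_index (bl : List String) (e : String) (j : Nat) :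
    (j : Int) ∈ (pvBuildIndex bl).getD e [] ↔ ∃ h : j < bl.length, bl[j] = e := by
  rw [pvIndex_getD]
  simp only [List.mem_map, List.mem_filter, List.mem_map, PySem.List.mem_enumerate_iff]
  constructor
  · rintro ⟨⟨s, i⟩, ⟨⟨⟨a, b⟩, ⟨k, hk, hab⟩, hswap⟩, hpe⟩, h2⟩
    simp only [Prod.mk.injEq] at hab hswap
    obtain ⟨rfl, rfl⟩ := hab
    simp only [beq_iff_eq] at hpe
    obtain ⟨rfl, rfl⟩ := hswap
    simp only at h2
    have hkj : k = j := by omega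
    subst hkj
    exact ⟨hk, hpe⟩
  · rintro ⟨h, he⟩
    exact ⟨(e, (j:Int)), ⟨⟨((j:Int), e), ⟨j, h, by simp [he]⟩, rfl⟩, by simp⟩, rfl⟩

theorem pvIndex_nonneg (bl : List String) (e : String) :
    ∀ c ∈ (pvBuildIndex bl).getD e [], 0 ≤ c := by
  intro c hc
  rw [pvIndex_getD] at hc
  simp only [List.mem_map, List.mem_filter, PySem.List.mem_enumerate_iff] at hc
  obtain ⟨p, ⟨⟨q, ⟨k, hk, rfl⟩, rfl⟩, _⟩, rfl⟩ := hc
  simp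

theorem pvMakeRow_eq (bl : List String) (s : List String) :
    pvMakeRow (pvBuildIndex bl) bl.length s = bl.map (fun b => if b ∈ s then (1:Int) else 0) := by
  apply List.ext_getElem?
  intro j
  unfold pvMakeRow
  rw [pvRowFold_getElem? s _ (fun e => pvIndex_nonneg bl e)]
  by_cases hj : j < bl.length
  · have hcond : (∃ e ∈ s, (j:Int) ∈ (pvBuildIndex bl).getD e []) ↔ bl[j] ∈ s := by
      constructor
      · rintro ⟨e, hes, hm⟩
        rw [pvMem_index] at hm
        obtain ⟨h, rfl⟩ := hm
        exact hes
      · intro h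
        exact ⟨bl[j], h, (pvMem_index bl _ j).2 ⟨hj, rfl⟩⟩
    by_cases hb : bl[j] ∈ s
    · rw [if_pos (hcond.2 hb), pvGetElem?_set]
      simp [hj, hb]
    · rw [if_neg (fun hc => hb (hcond.1 hc))]
      simp [hj, hb]
  · split <;>
      rw [List.getElem?_eq_none (by simp; omega), List.getElem?_eq_none (by simp; omega)]

theorem pvCondFold_getElem? (P : List Nat) (c : Nat → Prop) [DecidablePred c] (r : List Int) (j : Nat) :
    (P.foldl (fun r i => if c i then r.set i 1 else r) r)[j]? =
      if j ∈ P ∧ c j then (r.set j 1)[j]? else r[j]? := by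
  induction P generalizing r with
  | nil => simp
  | cons a P ih =>
    rw [List.foldl_cons, ih]
    by_cases hca : c a
    · rw [if_pos hca]
      by_cases hm : j ∈ P ∧ c j
      · rw [if_pos hm, if_pos ⟨List.mem_cons_of_mem _ hm.1, hm.2⟩, pvSet1]
      · by_cases hja : a = j
        · subst hja
          rw [if_neg hm, if_pos ⟨List.mem_cons_self, hca⟩]
        · rw [if_neg hm, if_neg (by rintro ⟨h1, h2⟩; rcases List.mem_cons.1 h1 with rfl|h
                                    · exact hja rfl
                                    · exact hm ⟨h, h2⟩), List.getElem?_set_ne hja]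
    · rw [if_neg hca]
      by_cases hm : j ∈ P ∧ c j
      · rw [if_pos hm, if_pos ⟨List.mem_cons_of_mem _ hm.1, hm.2⟩]
      · rw [if_neg hm, if_neg (by rintro ⟨h1, h2⟩; rcases List.mem_cons.1 h1 with rfl|h
                                  · exact hca h2
                                  · exact hm ⟨h, h2⟩)]

theorem pvInner_eq_set (L : List Nat) (c : Nat → Prop) [DecidablePred c] (i : Nat)
    (occ : List (List Int)) (hi : i < occ.length) :
    L.foldl (fun occ j => if c j then occ.set i ((occ.getD i []).set j 1) else occ) occ
      = occ.set i (L.foldl (fun r j => if c j then r.set j 1 else r) (occ.getD i [])) := by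
  induction L generalizing occ with
  | nil =>
    rw [List.foldl_nil, List.foldl_nil, List.getD_eq_getElem _ _ hi, List.set_getElem_self]
  | cons a L ih =>
    rw [List.foldl_cons, List.foldl_cons]
    by_cases hca : c a
    · rw [if_pos hca, if_pos hca, ih _ (by simpa using hi)]
      have hg : (occ.set i ((occ.getD i []).set a 1)).getD i [] = (occ.getD i []).set a 1 := by
        rw [List.getD_eq_getElem _ _ (by simpa using hi), List.getElem_set_self]
      rw [hg, List.set_set]
    · rw [if_neg hca, if_neg hca, ih _ hi]

theorem pvMapSet (m k : Nat) (hk : k < m) (f : Nat → List Int) (v : List Int) :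
    ((List.range m).map f).set k v = (List.range m).map (fun i => if i = k then v else f i) := by
  apply List.ext_getElem?
  intro j
  rw [pvGetElem?_set]
  by_cases hj : j < m
  · by_cases hjk : k = j
    · subst hjk
      rw [if_pos ⟨rfl, by simpa using hk⟩]
      simp [hj]
    · rw [if_neg (by simp [hjk])]
      have : ¬ j = k := fun h => hjk h.symm
      simp [hj, this]
  · rw [if_neg (by simp; omega), List.getElem?_eq_none (by simp; omega),
        List.getElem?_eq_none (by simp; omega)]

theorem pvOuter (m n : Nat) (c : Nat → Nat → Prop) [inst : ∀ i, DecidablePred (c i)]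
    (zrow : List Int) (k : Nat) (hk : k ≤ m) :
    (List.range k).foldl
      (fun occ i => (List.range n).foldl
        (fun occ j => if c i j then occ.set i ((occ.getD i []).set j 1) else occ) occ)
      ((List.range m).map (fun _ => zrow))
    = (List.range m).map (fun i =>
        if i < k then (List.range n).foldl (fun r j => if c i j then r.set j 1 else r) zrow
        else zrow) := by
  induction k with
  | zero => simp
  | succ k ih =>
    rw [List.range_succ, List.foldl_append, ih (by omega), List.foldl_cons, List.foldl_nil]
    rw [pvInner_eq_set _ _ _ _ (by simp; omega)]
    have hg : ((List.range m).map (fun i =>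
        if i < k then (List.range n).foldl (fun r j => if c i j then r.set j 1 else r) zrow
        else zrow)).getD k [] = zrow := by
      rw [List.getD_eq_getElem _ _ (by simp; omega)]
      simp
    rw [hg, pvMapSet m k (by omega)]
    apply List.map_congr_left
    intro i hi
    simp only [List.mem_range] at hi
    by_cases h1 : i = k
    · subst h1; simp
    · rw [if_neg h1]
      by_cases h2 : i < k
      · rw [if_pos h2, if_pos (by omega)]
      · rw [if_neg h2, if_neg (by omega)]

theorem pvRowF_eq (bl : List String) (s : List String) :
    (List.range bl.length).foldl
      (fun r j => if (bl.getD j "") ∈ s then r.set j 1 else r)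
      ((List.range bl.length).map (fun _ => (0:Int)))
    = bl.map (fun b => if b ∈ s then (1:Int) else 0) := by
  apply List.ext_getElem?
  intro j
  rw [pvCondFold_getElem?]
  by_cases hj : j < bl.length
  · have hg : bl.getD j "" = bl[j] := List.getD_eq_getElem bl "" hj
    by_cases hb : bl[j] ∈ s
    · rw [if_pos ⟨List.mem_range.2 hj, hg ▸ hb⟩, pvGetElem?_set]
      simp [hj, hb]
    · rw [if_neg (by rintro ⟨-, h⟩; exact hb (hg ▸ h))]
      simp [hj, hb]
  · rw [if_neg (by rintro ⟨h, -⟩; exact hj (List.mem_range.1 h))]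
    rw [List.getElem?_eq_none (by simp; omega), List.getElem?_eq_none (by simp; omega)]

theorem pvMapRange {α β : Type} (xs : List α) (d : α) (g : α → β) :
    (List.range xs.length).map (fun i => g (xs.getD i d)) = xs.map g := by
  apply List.ext_getElem?
  intro j
  by_cases hj : j < xs.length
  · simp [hj]
  · rw [List.getElem?_eq_none (by simp; omega), List.getElem?_eq_none (by simp; omega)]

theorem pvA_eq (bl : List String) (sbl : List (List String)) :
    calculateOccurrences bl sbl = sbl.map (fun s => bl.map (fun b => if b ∈ s then (1:Int) else 0)) := by
  unfold calculateOccurrences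
  rw [pvOuter sbl.length bl.length (fun i j => (bl.getD j "") ∈ (sbl.getD i []))
        ((List.range bl.length).map (fun _ => (0:Int))) sbl.length le_rfl]
  have h1 : (List.range sbl.length).map (fun i =>
      if i < sbl.length
      then (List.range bl.length).foldl
        (fun r j => if (bl.getD j "") ∈ (sbl.getD i []) then r.set j 1 else r)
        ((List.range bl.length).map (fun _ => (0:Int)))
      else (List.range bl.length).map (fun _ => (0:Int)))
    = (List.range sbl.length).map (fun i =>
        bl.map (fun b => if b ∈ (sbl.getD i []) then (1:Int) else 0)) := by
    apply List.map_congr_left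
    intro i hi
    rw [if_pos (List.mem_range.1 hi), pvRowF_eq]
  rw [h1, pvMapRange sbl [] (fun s => bl.map (fun b => if b ∈ s then (1:Int) else 0))]

-- ===== VERDICT (by name: the statement is the Claim_ definition above) =====
theorem calculateOccurrences_spec : Claim_equal_calculateOccurrences := by
  intro bl sbl _
  unfold Spec_calculateOccurrences calculateOccurrences_alt
  rw [pvA_eq]
  symm
  apply List.map_congr_left
  intro s _
  exact pvMakeRow_eq bl s
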